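-- pv_equiv track=rewrite | github.com/GlassOnTin/nchorder | src/nchorder_tools/gui/cheatsheet_view.py | parse_key_output
-- ===== SOURCE A (Python) =====
-- KEY_SYMBOLS = {
--     'space': '␣',
--     'enter': '↵',
--     'tab': '→|',
--     'bksp': '←x',
--     'del': 'x→',
--     'esc': 'Esc',
--     'up': '↑',
--     'down': '↓',
--     'left': '←',
--     'right': '→',
--     'home': '|←',
--     'end': '→|',
--     'pgup': '↑↑',
--     'pgdn': '↓↓',
--     'caps': 'Cap',
--     'ins': 'Ins',
--     'numlk': 'Num',
-- }
--
-- def parse_key_output(key_str: str) -> tuple[str, bool, bool, bool]: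
--     """
--     Parse a key string into (base_key, has_shift, has_alt, has_ctrl).
--
--     Format from chord_view.py key_str():
--         "a" -> plain lowercase
--         "A" -> shifted (uppercase = shift)
--         "C-x" -> Ctrl+x
--         "A-Tab" -> Alt+Tab
--         "S-F1" -> Shift+F1
--         "C-A-x" -> Ctrl+Alt+x
--
--     Examples:
--         "a" -> ("a", False, False, False)
--         "A" -> ("A", True, False, False)
--         "C-x" -> ("x", False, False, True)
--         "A-Tab" -> ("Tb", False, True, False)
--     """
--     has_shift = False
--     has_alt = False
--     has_ctrl = False
--
--     # Parse C-, A-, S- prefixes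
--     remaining = key_str
--     while True:
--         if remaining.startswith('C-'):
--             has_ctrl = True
--             remaining = remaining[2:]
--         elif remaining.startswith('A-'):
--             has_alt = True
--             remaining = remaining[2:]
--         elif remaining.startswith('S-'):
--             has_shift = True
--             remaining = remaining[2:]
--         else:
--             break
--
--     base = remaining
--
--     # Detect shift from uppercase single letter
--     if len(base) == 1 and base.isupper():
--         has_shift = True
--
--     # Convert to symbol if available
--     base_lower = base.lower()
--     if base_lower in KEY_SYMBOLS:
--         base = KEY_SYMBOLS[base_lower]
--
--     return base, has_shift, has_alt, has_ctrl
-- ===== SOURCE B (Python) =====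
-- import re
--
-- KEY_SYMBOLS = {
--     'space': '␣',
--     'enter': '↵',
--     'tab': '→|',
--     'bksp': '←x',
--     'del': 'x→',
--     'esc': 'Esc',
--     'up': '↑',
--     'down': '↓',
--     'left': '←',
--     'right': '→',
--     'home': '|←',
--     'end': '→|',
--     'pgup': '↑↑',
--     'pgdn': '↓↓',
--     'caps': 'Cap',
--     'ins': 'Ins',
--     'numlk': 'Num',
-- }
--
--
-- def parse_key_output(key_str: str) -> tuple[str, bool, bool, bool]:
--     """Match the whole leading modifier block at once, then read the flags off it."""
--     m = re.match(r'(?:C-|A-|S-)+', key_str)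
--     mods = m.group(0) if m else ''
--     base = key_str[len(mods):]
--     has_ctrl = 'C-' in mods
--     has_alt = 'A-' in mods
--     has_shift = 'S-' in mods or (len(base) == 1 and base.isupper())
--     return KEY_SYMBOLS.get(base.lower(), base), has_shift, has_alt, has_ctrl
-- ===== Notes on version B (the rewrite author's own statement) =====
-- stated objective: alternative
-- what changed: A strips modifier prefixes one token at a time in a while-loop, updating a flag per iteration; B matches the entire leading (C-|A-|S-)+ block at once (regex), splits the string there, and derives each flag by a single substring test on the block.
import Mathlib
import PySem

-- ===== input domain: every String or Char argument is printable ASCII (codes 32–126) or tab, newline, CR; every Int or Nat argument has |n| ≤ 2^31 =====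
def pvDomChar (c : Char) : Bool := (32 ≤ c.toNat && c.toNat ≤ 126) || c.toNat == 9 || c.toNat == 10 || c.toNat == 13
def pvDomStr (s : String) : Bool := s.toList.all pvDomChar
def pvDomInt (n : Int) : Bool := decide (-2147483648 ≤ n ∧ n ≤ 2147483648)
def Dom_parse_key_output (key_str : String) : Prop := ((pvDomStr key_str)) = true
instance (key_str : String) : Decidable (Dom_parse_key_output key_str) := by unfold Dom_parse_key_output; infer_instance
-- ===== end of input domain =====

-- B replaces A's iterative prefix-stripping loop (one flag update per stripped token) by a
-- different decomposition: measure the whole leading modifier block at once, split there, and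
-- read each flag off the block by one substring test (objective: alternative decomposition).

-- ===== PORT A =====
-- KEY_SYMBOLS, a module constant shared by both sources
def pvKeySymbols : PySem.Dict (List Char) (List Char) := PySem.Dict.ofList
  [ ("space".toList, "␣".toList), ("enter".toList, "↵".toList), ("tab".toList, "→|".toList)
  , ("bksp".toList, "←x".toList), ("del".toList, "x→".toList), ("esc".toList, "Esc".toList)
  , ("up".toList, "↑".toList), ("down".toList, "↓".toList), ("left".toList, "←".toList)
  , ("right".toList, "→".toList), ("home".toList, "|←".toList), ("end".toList, "→|".toList)
  , ("pgup".toList, "↑↑".toList), ("pgdn".toList, "↓↓".toList), ("caps".toList, "Cap".toList)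
  , ("ins".toList, "Ins".toList), ("numlk".toList, "Num".toList) ]

-- 'len(base) == 1 and base.isupper()' (the same line occurs in both sources; Python's
-- str.isupper on a single character is that character's isupper)
def pvIsUpper1 : List Char → Bool
  | [c] => PySem.Chars.isupper c
  | _ => false

-- A's 'while True' prefix-stripping loop over (remaining, has_shift, has_alt, has_ctrl)
def pvStripA : List Char → Bool → Bool → Bool → List Char × Bool × Bool × Bool
  | 'C' :: '-' :: rest, sh, al, _ct => pvStripA rest sh al true
  | 'A' :: '-' :: rest, sh, _al, ct => pvStripA rest sh true ct
  | 'S' :: '-' :: rest, _sh, al, ct => pvStripA rest true al ct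
  | remaining, sh, al, ct => (remaining, sh, al, ct)

def parse_key_output (key_str : String) : String × Bool × Bool × Bool :=
  let r := pvStripA key_str.toList false false false
  let base := r.1
  let has_shift := if pvIsUpper1 base then true else r.2.1
  let base_lower := PySem.Chars.lower base
  let base' := if pvKeySymbols.contains base_lower then pvKeySymbols.getD base_lower base else base
  (String.ofList base', has_shift, r.2.2.1, r.2.2.2)

-- ===== PORT B =====
-- length of the match of re.match(r'(?:C-|A-|S-)+', s): the maximal leading block of tokens
def pvModLen : List Char → Nat
  | c :: '-' :: rest => if c = 'C' ∨ c = 'A' ∨ c = 'S' then pvModLen rest + 2 else 0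
  | _ => 0

def parse_key_output_alt (key_str : String) : String × Bool × Bool × Bool :=
  let s := key_str.toList
  let mods := s.take (pvModLen s)
  let base := s.drop (pvModLen s)
  let has_ctrl := PySem.Chars.isIn ['C', '-'] mods
  let has_alt := PySem.Chars.isIn ['A', '-'] mods
  let has_shift := PySem.Chars.isIn ['S', '-'] mods || pvIsUpper1 base
  (String.ofList (pvKeySymbols.getD (PySem.Chars.lower base) base), has_shift, has_alt, has_ctrl)

-- ===== PRECONDITION & SPEC =====
def Spec_parse_key_output (key_str : String) (out : String × Bool × Bool × Bool) : Prop := out = parse_key_output_alt key_str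
instance (key_str : String) (out : String × Bool × Bool × Bool) : Decidable (Spec_parse_key_output key_str out) := by unfold Spec_parse_key_output; infer_instance

-- ===== CLAIM (what is proved, stated in full; the proofs are below) =====
def Claim_equal_parse_key_output : Prop := ∀ (key_str : String), Dom_parse_key_output key_str → Spec_parse_key_output key_str (parse_key_output key_str)

-- ===== LEMMAS AND PROOFS =====

lemma pvIsIn_front (a : Char) (m : List Char) :
    PySem.Chars.isIn [a, '-'] (a :: '-' :: m) = true :=
  (PySem.Chars.isIn_iff_infix _ _).mpr ⟨[], m, rfl⟩

lemma pvIsIn_step (a x : Char) (hx : a ≠ x) (ha : a ≠ '-') (m : List Char) :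
    PySem.Chars.isIn [a, '-'] (x :: '-' :: m) = PySem.Chars.isIn [a, '-'] m := by
  rw [Bool.eq_iff_iff]
  simp only [PySem.Chars.isIn_iff_infix, List.infix_cons_iff, List.cons_prefix_cons]
  simp [hx, ha]

lemma pvIsIn_nil (a : Char) : PySem.Chars.isIn [a, '-'] ([] : List Char) = false := by
  rw [Bool.eq_iff_iff]
  simp only [PySem.Chars.isIn_iff_infix]
  simp

lemma pvGetD_not_contains {κ ν : Type} [BEq κ] [LawfulBEq κ] (d : PySem.Dict κ ν) (k : κ)
    (dflt : ν) (h : d.contains k = false) : d.getD k dflt = dflt := by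
  have hg := (PySem.Dict.get?_eq_none_iff_contains d k).mpr h
  simp [PySem.Dict.getD, hg]

lemma pvStripA_eq (s : List Char) (sh al ct : Bool) :
    pvStripA s sh al ct =
      (s.drop (pvModLen s),
       sh || PySem.Chars.isIn ['S', '-'] (s.take (pvModLen s)),
       al || PySem.Chars.isIn ['A', '-'] (s.take (pvModLen s)),
       ct || PySem.Chars.isIn ['C', '-'] (s.take (pvModLen s))) := by
  fun_induction pvStripA s sh al ct with
  | case1 rest sh al ct ih =>
      have hm : pvModLen ('C' :: '-' :: rest) = pvModLen rest + 2 := by simp [pvModLen]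
      have ht : List.take (pvModLen rest + 2) ('C' :: '-' :: rest)
          = 'C' :: '-' :: List.take (pvModLen rest) rest := rfl
      have hd : List.drop (pvModLen rest + 2) ('C' :: '-' :: rest)
          = List.drop (pvModLen rest) rest := rfl
      rw [ih, hm, ht, hd, pvIsIn_front,
        pvIsIn_step 'S' 'C' (by decide) (by decide),
        pvIsIn_step 'A' 'C' (by decide) (by decide)]
      simp
  | case2 rest sh al ct ih =>
      have hm : pvModLen ('A' :: '-' :: rest) = pvModLen rest + 2 := by simp [pvModLen]
      have ht : List.take (pvModLen rest + 2) ('A' :: '-' :: rest)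
          = 'A' :: '-' :: List.take (pvModLen rest) rest := rfl
      have hd : List.drop (pvModLen rest + 2) ('A' :: '-' :: rest)
          = List.drop (pvModLen rest) rest := rfl
      rw [ih, hm, ht, hd, pvIsIn_front,
        pvIsIn_step 'S' 'A' (by decide) (by decide),
        pvIsIn_step 'C' 'A' (by decide) (by decide)]
      simp
  | case3 rest sh al ct ih =>
      have hm : pvModLen ('S' :: '-' :: rest) = pvModLen rest + 2 := by simp [pvModLen]
      have ht : List.take (pvModLen rest + 2) ('S' :: '-' :: rest)
          = 'S' :: '-' :: List.take (pvModLen rest) rest := rfl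
      have hd : List.drop (pvModLen rest + 2) ('S' :: '-' :: rest)
          = List.drop (pvModLen rest) rest := rfl
      rw [ih, hm, ht, hd, pvIsIn_front,
        pvIsIn_step 'A' 'S' (by decide) (by decide),
        pvIsIn_step 'C' 'S' (by decide) (by decide)]
      simp
  | case4 s sh al ct h1 h2 h3 =>
      have hz : pvModLen s = 0 := by
        rw [pvModLen.eq_def]
        split
        · next c rest =>
            rw [if_neg]
            rintro (rfl | rfl | rfl)
            · exact h1 rest rfl
            · exact h2 rest rfl
            · exact h3 rest rfl
        · rfl
      simp [hz, pvIsIn_nil]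

-- ===== VERDICT (by name: the statement is the Claim_ definition above) =====
theorem parse_key_output_spec : Claim_equal_parse_key_output := by
  intro key_str _
  unfold Spec_parse_key_output parse_key_output parse_key_output_alt
  rw [pvStripA_eq]
  simp only [Bool.false_or]
  refine Prod.ext ?_ (Prod.ext ?_ rfl)
  · by_cases h : pvKeySymbols.contains (PySem.Chars.lower (key_str.toList.drop (pvModLen key_str.toList))) = true
    · simp [h]
    · simp only [Bool.not_eq_true] at h
      simp [h, pvGetD_not_contains _ _ _ h]
  · cases pvIsUpper1 (key_str.toList.drop (pvModLen key_str.toList)) <;> simp
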